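-- pv_equiv track=rewrite | github.com/sreerekha17/NPU-CS350 | Lecture/week1/#2-bounce-back-fourth-sequence.py | bnc_bck_frth
-- ===== SOURCE A (Python) =====
-- def isIndexDeterminingNumber(n):
--     if n > 10:
--         return n % 10 == 7 or n %7 == 0 or isIndexDeterminingNumber(n//10)
--     elif n < 10:
--         return n == 7
--     else:
--         return False
--
-- def bnc_bck_frth(k):
--     determining_indices = [0]
--     for i in range(1, k +1):
--         if (isIndexDeterminingNumber(i)):
--             determining_indices.append(i)
--
--     if(determining_indices[len(determining_indices) -1] != k):
--         determining_indices += [k]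
--
--     nextOperation = '+'
--     index = 0
--     for j in range(1, len(determining_indices)):
--         i = j-1
--         if (nextOperation == '-'):
--             index -= determining_indices[j] - determining_indices[i]
--             nextOperation = '+'
--         else:
--             index += determining_indices[j] - determining_indices[i]
--             nextOperation = '-'
--     return index
-- ===== SOURCE B (Python) =====
-- def isIndexDeterminingNumber(n):
--     while n > 10:
--         if n % 10 == 7 or n % 7 == 0:
--             return True
--         n //= 10
--     return n == 7
--
-- def bnc_bck_frth(k):
--     acc = 0
--     sign = 1
--     prev = 0
--     for i in range(1, k + 1):
--         if isIndexDeterminingNumber(i):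
--             acc += sign * (i - prev)
--             sign = -sign
--             prev = i
--     if prev != k:
--         acc += sign * (k - prev)
--     return acc
-- ===== Notes on version B (the rewrite author's own statement) =====
-- stated objective: simpler
-- what changed: B replaces A's two-phase build-a-list-of-determining-indices-then-alternate-difference loop by a single streaming pass keeping (acc, sign, prev), and the recursive digit-peeling predicate by an iterative while-loop; no intermediate list is built.
import Mathlib
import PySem

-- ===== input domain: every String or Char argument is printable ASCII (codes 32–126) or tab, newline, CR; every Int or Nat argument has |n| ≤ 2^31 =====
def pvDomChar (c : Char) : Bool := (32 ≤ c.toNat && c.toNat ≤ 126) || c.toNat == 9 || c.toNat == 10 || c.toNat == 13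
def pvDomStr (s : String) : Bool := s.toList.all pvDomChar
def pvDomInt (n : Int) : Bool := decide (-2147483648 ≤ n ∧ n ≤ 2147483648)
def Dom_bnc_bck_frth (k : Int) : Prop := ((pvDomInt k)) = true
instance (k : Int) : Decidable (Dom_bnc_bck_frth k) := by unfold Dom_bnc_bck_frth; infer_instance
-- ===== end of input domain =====

-- B replaces A's build-list-then-alternate-difference two-phase structure by a single
-- streaming pass keeping (acc, sign, prev); objective: simpler (no intermediate list).

-- ===== PORT A =====
-- recursive digit-peeling predicate, exactly A's isIndexDeterminingNumber
def isIdxDet (n : Int) : Bool :=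
  if 10 < n then
    decide (PySem.Int.mod n 10 = 7) || decide (PySem.Int.mod n 7 = 0) ||
      isIdxDet (PySem.Int.floordiv n 10)
  else if n < 10 then decide (n = 7)
  else false
termination_by n.toNat
decreasing_by
  rw [PySem.Int.floordiv_eq_ediv_of_pos (by norm_num)]
  omega

def bnc_bck_frth (k : Int) : Int :=
  let ds := (PySem.List.pyRange 1 (k + 1) 1).foldl
    (fun ds i => if isIdxDet i then ds ++ [i] else ds) [0]
  let ds := if PySem.List.pyGetD ds ((ds.length : Int) - 1) 0 ≠ k then ds ++ [k] else ds
  let st := (PySem.List.pyRange 1 (ds.length : Int) 1).foldl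
    (fun (st : String × Int) j =>
      let i := j - 1
      if st.1 = "-" then
        ("+", st.2 - (PySem.List.pyGetD ds j 0 - PySem.List.pyGetD ds i 0))
      else
        ("-", st.2 + (PySem.List.pyGetD ds j 0 - PySem.List.pyGetD ds i 0)))
    ("+", 0)
  st.2

-- ===== PORT B =====
-- iterative while-loop form of the same predicate (Source B)
def isIdxDetAlt (n : Int) : Bool :=
  if 10 < n then
    if decide (PySem.Int.mod n 10 = 7) || decide (PySem.Int.mod n 7 = 0) then true
    else isIdxDetAlt (PySem.Int.floordiv n 10)
  else decide (n = 7)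
termination_by n.toNat
decreasing_by
  rw [PySem.Int.floordiv_eq_ediv_of_pos (by norm_num)]
  omega

def bnc_bck_frth_alt (k : Int) : Int :=
  let st := (PySem.List.pyRange 1 (k + 1) 1).foldl
    (fun (st : Int × Int × Int) i =>
      if isIdxDetAlt i then (st.1 + st.2.1 * (i - st.2.2), -st.2.1, i) else st)
    (0, 1, 0)
  if st.2.2 ≠ k then st.1 + st.2.1 * (k - st.2.2) else st.1

-- ===== PRECONDITION & SPEC =====
def Spec_bnc_bck_frth (k : Int) (out : Int) : Prop := out = bnc_bck_frth_alt k
instance (k : Int) (out : Int) : Decidable (Spec_bnc_bck_frth k out) := by unfold Spec_bnc_bck_frth; infer_instance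

-- ===== CLAIM (what is proved, stated in full; the proofs are below) =====
def Claim_equal_bnc_bck_frth : Prop := ∀ (k : Int), Dom_bnc_bck_frth k → Spec_bnc_bck_frth k (bnc_bck_frth k)

-- ===== LEMMAS AND PROOFS =====

theorem det_eq (n : Int) : isIdxDet n = isIdxDetAlt n := by
  fun_induction isIdxDet n with
  | case1 n h ih =>
    rw [isIdxDetAlt]
    simp only [if_pos h, ih]
    cases h7 : (decide (PySem.Int.mod n 10 = 7) || decide (PySem.Int.mod n 7 = 0)) <;> simp
  | case2 n h h' =>
    rw [isIdxDetAlt]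
    simp [h]
  | case3 n h h' =>
    rw [isIdxDetAlt]
    have : n = 10 := by omega
    simp [this]

-- the alternating telescoped sum over a list of breakpoints, starting sign s and previous value p
def altsum : Int → List Int → Int → Int
  | _, [], _ => 0
  | s, d :: ds, p => s * (d - p) + altsum (-s) ds d

theorem altsum_snoc (s p x : Int) (l : List Int) :
    altsum s (l ++ [x]) p = altsum s l p + (s * (-1) ^ l.length) * (x - l.getLastD p) := by
  induction l generalizing s p with
  | nil => simp [altsum]
  | cons d l ih =>
    simp only [List.cons_append, altsum, ih (-s) d, List.getLastD_cons, List.length_cons]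
    ring

-- B's fold over the determining elements only
theorem bcore (fs : List Int) : ∀ (l : List Int) (p : Int),
    fs.foldl (fun (st : Int × Int × Int) i => (st.1 + st.2.1 * (i - st.2.2), -st.2.1, i))
      (altsum 1 l p, (-1) ^ l.length, l.getLastD p)
    = (altsum 1 (l ++ fs) p, (-1) ^ (l ++ fs).length, (l ++ fs).getLastD p) := by
  induction fs with
  | nil => intro l p; simp
  | cons f fs ih =>
    intro l p
    simp only [List.foldl_cons]
    have hst : ((altsum 1 l p + (-1 : Int) ^ l.length * (f - l.getLastD p), -((-1 : Int) ^ l.length), f) : Int × Int × Int)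
        = (altsum 1 (l ++ [f]) p, (-1) ^ (l ++ [f]).length, (l ++ [f]).getLastD p) := by
      rw [altsum_snoc]
      refine Prod.ext (by ring) (Prod.ext (by simp [pow_succ]) (by simp))
    rw [hst, ih (l ++ [f]) p]
    simp

theorem last_cons_getLastD (a : Int) (l : List Int) (h : (a :: l) ≠ []) :
    (a :: l).getLast h = l.getLastD a := by
  induction l generalizing a with
  | nil => rfl
  | cons b t ih => rw [List.getLast_cons (by simp), ih, List.getLastD_cons]

theorem getD_last {pref : List Int} (h : pref ≠ []) (d : Int) :
    PySem.List.pyGetD pref ((pref.length : Int) - 1) d = pref.getLast h := by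
  have hlen : 1 ≤ pref.length := List.length_pos_iff.mpr h
  have : ((pref.length : Int) - 1) = ((pref.length - 1 : Nat) : Int) := by omega
  rw [this, PySem.List.pyGetD_natCast]
  rw [List.getLast_eq_getElem]
  rw [List.getD_eq_getElem _ _ (by omega)]

-- A's second loop computes altsum over the breakpoint list
theorem phase2 (l : List Int) : ∀ (pref : List Int) (h : pref ≠ []) (acc : Int) (op : String),
    op = "+" ∨ op = "-" →
    ((PySem.List.pyRange (pref.length : Int) (((pref ++ l).length : Nat) : Int) 1).foldl
      (fun (st : String × Int) j =>
        let i := j - 1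
        if st.1 = "-" then
          ("+", st.2 - (PySem.List.pyGetD (pref ++ l) j 0 - PySem.List.pyGetD (pref ++ l) i 0))
        else
          ("-", st.2 + (PySem.List.pyGetD (pref ++ l) j 0 - PySem.List.pyGetD (pref ++ l) i 0)))
      (op, acc)).2
    = acc + altsum (if op = "-" then -1 else 1) l (pref.getLast h) := by
  induction l with
  | nil =>
    intro pref h acc op hop
    rw [PySem.List.pyRange_one_eq_nil (by simp)]
    simp [altsum]
  | cons d l ih =>
    intro pref h acc op hop
    have hlt : (pref.length : Int) < (((pref ++ d :: l).length : Nat) : Int) := by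
      simp
    rw [PySem.List.pyRange_one_cons hlt]
    have hgetj : PySem.List.pyGetD (pref ++ d :: l) (pref.length : Int) 0 = d := by
      rw [PySem.List.pyGetD_natCast]
      rw [List.getD_eq_getElem _ _ (by simp)]
      simp
    have hgeti : PySem.List.pyGetD (pref ++ d :: l) ((pref.length : Int) - 1) 0 = pref.getLast h := by
      have hlen : 1 ≤ pref.length := List.length_pos_iff.mpr h
      have : ((pref.length : Int) - 1) = ((pref.length - 1 : Nat) : Int) := by omega
      rw [this, PySem.List.pyGetD_natCast]
      rw [List.getD_eq_getElem _ _ (by simp; omega)]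
      rw [List.getLast_eq_getElem]
      rw [List.getElem_append_left (by omega)]
    have hpref' : (pref ++ [d]) ++ l = pref ++ d :: l := by simp
    have hlast' : (pref ++ [d]).getLast (by simp) = d := by simp
    have hlen' : ((pref ++ [d]).length : Int) = (pref.length : Int) + 1 := by simp
    rcases hop with hop | hop <;> subst hop
    · -- op = "+"
      simp only [List.foldl_cons, String.reduceEq, reduceIte]
      rw [hgetj, hgeti]
      have := ih (pref ++ [d]) (by simp) (acc + (d - pref.getLast h)) "-" (Or.inr rfl)
      simp only [reduceIte] at this
      rw [hpref', hlen', hlast'] at this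
      rw [this]
      simp only [altsum]
      ring
    · -- op = "-"
      simp only [List.foldl_cons, reduceIte]
      rw [hgetj, hgeti]
      have := ih (pref ++ [d]) (by simp) (acc - (d - pref.getLast h)) "+" (Or.inl rfl)
      simp only [String.reduceEq, reduceIte] at this
      rw [hpref', hlen', hlast'] at this
      rw [this]
      simp only [altsum, neg_neg]
      ring

-- ===== VERDICT (by name: the statement is the Claim_ definition above) =====
theorem bnc_bck_frth_spec : Claim_equal_bnc_bck_frth := by
  intro k _
  unfold Spec_bnc_bck_frth bnc_bck_frth bnc_bck_frth_alt
  set F : List Int := (PySem.List.pyRange 1 (k + 1) 1).filter isIdxDet with hF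
  -- A's first loop builds 0 :: F
  have hAlist : (PySem.List.pyRange 1 (k + 1) 1).foldl
      (fun ds i => if isIdxDet i then ds ++ [i] else ds) [0] = 0 :: F := by
    rw [PySem.List.foldl_append_if_eq_filter]
    rfl
  -- B's loop: filter then unconditional fold, with the same filter
  have hdet : (PySem.List.pyRange 1 (k + 1) 1).filter isIdxDetAlt = F := by
    rw [hF]; congr 1; funext n; rw [det_eq]
  have hB : (PySem.List.pyRange 1 (k + 1) 1).foldl
      (fun (st : Int × Int × Int) i =>
        if isIdxDetAlt i then (st.1 + st.2.1 * (i - st.2.2), -st.2.1, i) else st)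
      (0, 1, 0)
      = (altsum 1 F 0, (-1) ^ F.length, F.getLastD 0) := by
    rw [← List.foldl_filter, hdet]
    have := bcore F [] 0
    simpa [altsum] using this
  simp only [hAlist, hB]
  -- A's last-element test
  have hlastA : PySem.List.pyGetD (0 :: F) (((0 :: F).length : Int) - 1) 0 = F.getLastD 0 := by
    rw [getD_last (by simp), last_cons_getLastD]
  rw [hlastA]
  by_cases hk : F.getLastD 0 ≠ k
  · rw [if_pos hk, if_pos hk]
    simp only [List.cons_append]
    have h2 := phase2 (F ++ [k]) [0] (by simp) 0 "+" (Or.inl rfl)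
    simp only [List.singleton_append, List.length_singleton, Nat.cast_one,
      List.getLast_singleton, String.reduceEq, reduceIte, zero_add] at h2
    rw [h2, altsum_snoc]
    ring
  · rw [if_neg hk, if_neg hk]
    have h2 := phase2 F [0] (by simp) 0 "+" (Or.inl rfl)
    simp only [List.singleton_append, List.length_singleton, Nat.cast_one,
      List.getLast_singleton, String.reduceEq, reduceIte, zero_add] at h2
    rw [h2]
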